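-- pv_equiv track=rewrite | github.com/UTSAVS26/PyVerse | Algorithms_and_Data_Structures/Maths/count_of_matches.py | tournament_matches
-- ===== SOURCE A (Python) =====
-- def tournament_matches(n):
--     total_matches = 0
--     while n > 1:
--         if n % 2 == 0:
--             matches = n // 2
--             n = matches
--         else:
--             matches = (n - 1) // 2
--             n = matches + 1
--         total_matches += matches
--     return total_matches
-- ===== SOURCE B (Python) =====
-- def tournament_matches(n):
--     # closed form: a single-elimination tournament with n>1 players plays n-1 matches
--     return n - 1 if n > 1 else 0
-- ===== Notes on version B (the rewrite author's own statement) =====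
-- stated objective: faster
-- what changed: Replaced the halving loop that sums per-round match counts with the closed form n-1 (0 for n<=1).
import Mathlib
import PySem

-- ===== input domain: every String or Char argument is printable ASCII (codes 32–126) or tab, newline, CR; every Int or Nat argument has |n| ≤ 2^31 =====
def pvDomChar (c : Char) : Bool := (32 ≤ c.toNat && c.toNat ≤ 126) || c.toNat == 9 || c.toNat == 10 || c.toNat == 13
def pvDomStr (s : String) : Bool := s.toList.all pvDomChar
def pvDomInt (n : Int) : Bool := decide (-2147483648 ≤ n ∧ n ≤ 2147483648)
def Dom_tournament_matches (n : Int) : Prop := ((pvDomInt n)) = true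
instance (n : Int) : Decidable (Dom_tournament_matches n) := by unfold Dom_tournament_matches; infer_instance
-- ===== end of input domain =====

-- B replaces A's round-by-round halving loop with the closed form n-1 (0 for n ≤ 1): asymptotically faster, O(1) vs O(log n).

-- ===== PORT A =====
-- literal transliteration of A's while loop (state: n, total_matches)
def tournament_matches_loop (n total_matches : Int) : Int :=
  if n > 1 then
    if PySem.Int.mod n 2 = 0 then
      tournament_matches_loop (PySem.Int.floordiv n 2) (total_matches + PySem.Int.floordiv n 2)
    else
      tournament_matches_loop (PySem.Int.floordiv (n - 1) 2 + 1) (total_matches + PySem.Int.floordiv (n - 1) 2)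
  else total_matches
termination_by n.toNat
decreasing_by
  · rw [PySem.Int.floordiv_eq_ediv_of_pos (by omega)]; omega
  · rw [PySem.Int.floordiv_eq_ediv_of_pos (by omega)]; omega

def tournament_matches (n : Int) : Int := tournament_matches_loop n 0

-- ===== PORT B =====
def tournament_matches_alt (n : Int) : Int := if n > 1 then n - 1 else 0

-- ===== PRECONDITION & SPEC =====
def Spec_tournament_matches (n : Int) (out : Int) : Prop := out = tournament_matches_alt n
instance (n : Int) (out : Int) : Decidable (Spec_tournament_matches n out) := by unfold Spec_tournament_matches; infer_instance

-- ===== CLAIM (what is proved, stated in full; the proofs are below) =====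
def Claim_equal_tournament_matches : Prop := ∀ (n : Int), Dom_tournament_matches n → Spec_tournament_matches n (tournament_matches n)

-- ===== LEMMAS AND PROOFS =====
theorem tournament_matches_loop_eq (n acc : Int) :
    tournament_matches_loop n acc = acc + (if n > 1 then n - 1 else 0) := by
  induction n, acc using tournament_matches_loop.induct with
  | case1 n acc h heven ih =>
      rw [PySem.Int.floordiv_eq_ediv_of_pos (by omega)] at ih
      rw [tournament_matches_loop, if_pos h, if_pos heven,
        PySem.Int.floordiv_eq_ediv_of_pos (by omega), ih]
      have := PySem.Int.floordiv_mul_add_mod n 2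
      rw [PySem.Int.mod_eq_emod_of_pos (by omega : (0:Int) < 2)] at heven
      rw [PySem.Int.floordiv_eq_ediv_of_pos (by omega), PySem.Int.mod_eq_emod_of_pos (by omega : (0:Int) < 2)] at this
      split_ifs <;> omega
  | case2 n acc h hodd ih =>
      rw [PySem.Int.floordiv_eq_ediv_of_pos (by omega)] at ih
      rw [tournament_matches_loop, if_pos h, if_neg hodd,
        PySem.Int.floordiv_eq_ediv_of_pos (by omega), ih]
      have := PySem.Int.floordiv_mul_add_mod (n - 1) 2
      rw [PySem.Int.floordiv_eq_ediv_of_pos (by omega), PySem.Int.mod_eq_emod_of_pos (by omega : (0:Int) < 2)] at this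
      have hm := hodd
      rw [PySem.Int.mod_eq_emod_of_pos (by omega : (0:Int) < 2)] at hm
      split_ifs <;> omega
  | case3 n acc h =>
      rw [tournament_matches_loop, if_neg h, if_neg h]; omega

-- ===== VERDICT (by name: the statement is the Claim_ definition above) =====
theorem tournament_matches_spec : Claim_equal_tournament_matches := by
  intro n _
  unfold Spec_tournament_matches tournament_matches tournament_matches_alt
  rw [tournament_matches_loop_eq]; omega
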